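-- pv_equiv track=rewrite | github.com/kishordgupta/MapReduce_websiteclassification | service/preprocessor.py | set_cat_indx_map
-- ===== SOURCE A (Python) =====
-- def set_cat_indx_map(ds):
--     l = len(ds)
--     cats = {}
--     for i in range(l):
--         for j in range(len(ds[i])):
--             v = ds[i][j]
--             if (j,v) not in cats:
--                 c = sum([ 1 for (idx,c) in cats if idx == j])
--                 cats[j,v] = c
--             ds[i][j] = cats[j,v]
--     return cats
-- ===== SOURCE B (Python) =====
-- def set_cat_indx_map(ds):
--     # Pass 1: build the per-column category index table without touching ds,
--     # keeping a next-free-index counter per column instead of recounting cats.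
--     cats = {}
--     nxt = {}
--     for row in ds:
--         for j, v in enumerate(row):
--             if (j, v) not in cats:
--                 cats[j, v] = nxt.get(j, 0)
--                 nxt[j] = nxt.get(j, 0) + 1
--     # Pass 2: apply the finished table to ds in place (same mutation as A).
--     for row in ds:
--         for j in range(len(row)):
--             row[j] = cats[j, row[j]]
--     return cats
-- ===== Notes on version B (the rewrite author's own statement) =====
-- stated objective: faster
-- what changed: B replaces A's single interleaved scan (which recounts the whole cats dict to find each new per-column index and mutates ds while indexing) with two passes: pass 1 builds cats over the untouched ds using an O(1) per-column next-index counter dict, pass 2 applies the finished table to ds.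
import Mathlib
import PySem

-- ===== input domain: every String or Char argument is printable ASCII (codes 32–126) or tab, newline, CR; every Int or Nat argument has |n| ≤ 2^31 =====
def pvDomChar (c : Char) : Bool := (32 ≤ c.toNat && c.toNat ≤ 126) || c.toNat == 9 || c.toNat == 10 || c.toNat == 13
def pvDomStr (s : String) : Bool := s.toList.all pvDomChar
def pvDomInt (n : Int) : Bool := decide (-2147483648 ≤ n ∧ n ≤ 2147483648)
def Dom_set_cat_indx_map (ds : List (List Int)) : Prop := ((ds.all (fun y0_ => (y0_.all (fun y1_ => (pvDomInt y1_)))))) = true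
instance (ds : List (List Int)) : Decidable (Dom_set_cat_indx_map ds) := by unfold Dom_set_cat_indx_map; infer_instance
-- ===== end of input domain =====

-- B builds the category table in a first pass with a per-column next-index counter and applies it to ds in a
-- second pass, instead of A's single interleaved scan that recounts cats for every new category; equivalence is
-- about the RETURN value (both Pythons perform the same in-place mutation of ds; the ports return cats only).

-- ===== PORT A =====
-- A's inner loop over one row: j is the column index, the row is consumed left to right (each Python write
-- ds[i][j] = … happens strictly after the read of that cell, so the recursion reads exactly the values A reads);
-- returns the mutated row together with the updated cats.  sum([1 for (idx,c) in cats if idx == j]) iterates the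
-- KEYS (j,v) of cats, so it counts the keys whose column is j.
def pvA_row (j : Int) (row : List Int) (cats : PySem.Dict (Int × Int) Int) :
    List Int × PySem.Dict (Int × Int) Int :=
  match row with
  | [] => ([], cats)
  | v :: rest =>
    let cats1 :=
      if cats.contains (j, v) then cats
      else
        let c : Int := ((cats.keys.filter (fun k => k.1 == j)).map (fun _ => (1 : Int))).sum
        cats.insert (j, v) c
    let w := cats1.getD (j, v) 0          -- ds[i][j] = cats[j,v]
    let p := pvA_row (j + 1) rest cats1
    (w :: p.1, p.2)

def set_cat_indx_map (ds : List (List Int)) : List (Int × Int × Int) :=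
  let st := ds.foldl
    (fun (acc : List (List Int) × PySem.Dict (Int × Int) Int) row =>
      let p := pvA_row 0 row acc.2
      (acc.1 ++ [p.1], p.2))
    ([], PySem.Dict.empty)
  st.2.items.map (fun p => (p.1.1, p.1.2, p.2))   -- dict[(j,v)] = c  ↦  (j, v, c) triples (type convention)

-- ===== PORT B =====
-- pass-1 step for one cell (j, v): on a fresh key assign nxt.get(j, 0) and bump the column counter
def pvB_cell (st : PySem.Dict (Int × Int) Int × PySem.Dict Int Int) (jv : Int × Int) :
    PySem.Dict (Int × Int) Int × PySem.Dict Int Int :=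
  if st.1.contains jv then st
  else (st.1.insert jv (st.2.getD jv.1 0), st.2.insert jv.1 (st.2.getD jv.1 0 + 1))

-- pass 2 maps one row through the finished table (row[j] = cats[j, row[j]])
def pvB_apply (cats : PySem.Dict (Int × Int) Int) (row : List Int) : List Int :=
  (PySem.List.enumerate row 0).map (fun jv => cats.getD jv 0)

def set_cat_indx_map_alt (ds : List (List Int)) : List (Int × Int × Int) :=
  let st := ds.foldl
    (fun st row => (PySem.List.enumerate row 0).foldl pvB_cell st)
    (PySem.Dict.empty, PySem.Dict.empty)
  let _ds2 := ds.map (pvB_apply st.1)               -- pass 2 (the in-place mutation; return value is cats)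
  st.1.items.map (fun p => (p.1.1, p.1.2, p.2))

-- ===== PRECONDITION & SPEC =====
def Spec_set_cat_indx_map (ds : List (List Int)) (out : List (Int × Int × Int)) : Prop := out = set_cat_indx_map_alt ds
instance (ds : List (List Int)) (out : List (Int × Int × Int)) : Decidable (Spec_set_cat_indx_map ds out) := by unfold Spec_set_cat_indx_map; infer_instance

-- ===== CLAIM (what is proved, stated in full; the proofs are below) =====
def Claim_equal_set_cat_indx_map : Prop := ∀ (ds : List (List Int)), Dom_set_cat_indx_map ds → Spec_set_cat_indx_map ds (set_cat_indx_map ds)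

-- ===== LEMMAS AND PROOFS =====

-- the invariant tying B's counter dict to A's recount: nxt[j] is the number of cats keys in column j
def pvInv (cats : PySem.Dict (Int × Int) Int) (nxt : PySem.Dict Int Int) : Prop :=
  ∀ j : Int, nxt.getD j 0 = ((cats.keys.filter (fun k => k.1 == j)).length : Int)

theorem pvInv_empty : pvInv PySem.Dict.empty PySem.Dict.empty := by
  intro j; simp [PySem.Dict.getD_empty, PySem.Dict.keys_empty]

-- one cell: starting from related states, B's step returns A's updated cats and preserves the invariant
theorem pv_cell_step (j v : Int) (cats : PySem.Dict (Int × Int) Int) (nxt : PySem.Dict Int Int)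
    (h : pvInv cats nxt) :
    (pvB_cell (cats, nxt) (j, v)).1 =
      (if cats.contains (j, v) then cats
       else cats.insert (j, v) (((cats.keys.filter (fun k => k.1 == j)).map (fun _ => (1 : Int))).sum))
    ∧ pvInv (pvB_cell (cats, nxt) (j, v)).1 (pvB_cell (cats, nxt) (j, v)).2 := by
  by_cases hc : cats.contains (j, v)
  · simp [pvB_cell, hc]; exact h
  · simp [pvB_cell, hc, h j]
    intro j'
    rw [PySem.Dict.keys_insert_of_not_contains _ _ (by simp [hc])]
    rw [PySem.Dict.getD_insert]
    by_cases hj : j' = j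
    · subst hj
      simp [List.filter_append]
    · have hj' : ¬ j = j' := fun hh => hj hh.symm
      simp [hj, hj', List.filter_append, h j']

-- A's per-row cats is a fold of the same cell steps; relate it to B's enumerate fold
theorem pv_row (row : List Int) : ∀ (j : Int) (cats : PySem.Dict (Int × Int) Int) (nxt : PySem.Dict Int Int),
    pvInv cats nxt →
    ((PySem.List.enumerate row j).foldl pvB_cell (cats, nxt)).1 = (pvA_row j row cats).2
    ∧ pvInv ((PySem.List.enumerate row j).foldl pvB_cell (cats, nxt)).1
            ((PySem.List.enumerate row j).foldl pvB_cell (cats, nxt)).2 := by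
  induction row with
  | nil => intro j cats nxt h; simpa [PySem.List.enumerate_nil, pvA_row] using h
  | cons v rest ih =>
    intro j cats nxt h
    obtain ⟨h1, h2⟩ := pv_cell_step j v cats nxt h
    rw [PySem.List.enumerate_cons]
    simp only [List.foldl_cons]
    have := ih (j + 1) (pvB_cell (cats, nxt) (j, v)).1 (pvB_cell (cats, nxt) (j, v)).2 h2
    constructor
    · rw [(this).1, h1]
      simp only [pvA_row]
    · exact this.2

-- lift to the whole dataset: A's outer fold threads (rows, cats); only cats matters for the result
theorem pv_ds (ds : List (List Int)) : ∀ (rowsA : List (List Int)) (cats : PySem.Dict (Int × Int) Int)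
    (nxt : PySem.Dict Int Int), pvInv cats nxt →
    (ds.foldl (fun st row => (PySem.List.enumerate row 0).foldl pvB_cell st) (cats, nxt)).1 =
    (ds.foldl (fun (acc : List (List Int) × PySem.Dict (Int × Int) Int) row =>
        let p := pvA_row 0 row acc.2
        (acc.1 ++ [p.1], p.2)) (rowsA, cats)).2 := by
  induction ds with
  | nil => intro rowsA cats nxt _; rfl
  | cons row rest ih =>
    intro rowsA cats nxt h
    obtain ⟨h1, h2⟩ := pv_row row 0 cats nxt h
    simp only [List.foldl_cons]
    have h3 := ih (rowsA ++ [(pvA_row 0 row cats).1])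
        ((PySem.List.enumerate row 0).foldl pvB_cell (cats, nxt)).1
        ((PySem.List.enumerate row 0).foldl pvB_cell (cats, nxt)).2 h2
    rw [h1] at h3
    have hsplit : (PySem.List.enumerate row 0).foldl pvB_cell (cats, nxt) =
        ((pvA_row 0 row cats).2, ((PySem.List.enumerate row 0).foldl pvB_cell (cats, nxt)).2) :=
      Prod.ext h1 rfl
    rw [hsplit]
    exact h3

-- ===== VERDICT (by name: the statement is the Claim_ definition above) =====
theorem set_cat_indx_map_spec : Claim_equal_set_cat_indx_map := by
  intro ds _
  unfold Spec_set_cat_indx_map set_cat_indx_map set_cat_indx_map_alt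
  simp only
  rw [pv_ds ds [] PySem.Dict.empty PySem.Dict.empty pvInv_empty]
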